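-- pv_equiv track=rewrite | github.com/pangolin16/allcode | Work/FilesPy/urad_prace_search.py | _filter_driver_license
-- ===== SOURCE A (Python) =====
-- from typing import List, Dict, Optional
--
-- def _filter_driver_license(jobs: List[Dict]) -> List[Dict]:
--     """Filter out jobs requiring a driver's license"""
--     driver_keywords = [
--         "řidič", "ridic", "řidičský", "ridicsky", "řp", "ŘP",
--         "vozidlo", "auto", "doprava", "řízení", "řidičák", "ridicak",
--         "kategorie", "c+e", "c e", "b+e", "driving", "driver", "license",
--         "vzv", "vysokozdvižný", "vysokozdvizny"
--     ]
--
--     filtered_jobs = []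
--     for job in jobs:
--         title_lower = str(job.get("title", "")).lower()
--         description_lower = str(job.get("description", "")).lower()
--
--         has_driver = any(
--             keyword.lower() in title_lower or keyword.lower() in description_lower
--             for keyword in driver_keywords
--         )
--
--         if not has_driver:
--             filtered_jobs.append(job)
--
--     return filtered_jobs
-- ===== SOURCE B (Python) =====
-- import re
-- from typing import List, Dict
--
-- _DRIVER_KEYWORDS = [
--     "řidič", "ridic", "řidičský", "ridicsky", "řp", "ŘP",
--     "vozidlo", "auto", "doprava", "řízení", "řidičák", "ridicak",
--     "kategorie", "c+e", "c e", "b+e", "driving", "driver", "license",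
--     "vzv", "vysokozdvižný", "vysokozdvizny"
-- ]
--
-- _DRIVER_PATTERN = re.compile(
--     "|".join(re.escape(k) for k in _DRIVER_KEYWORDS), re.IGNORECASE
-- )
--
-- def _filter_driver_license(jobs: List[Dict]) -> List[Dict]:
--     """Filter out jobs requiring a driver's license"""
--     search = _DRIVER_PATTERN.search
--     return [
--         job for job in jobs
--         if not (search(str(job.get("title", ""))) or
--                 search(str(job.get("description", ""))))
--     ]
-- ===== Notes on version B (the rewrite author's own statement) =====
-- stated objective: idiomatic
-- what changed: Replaces A's per-job Python loop over 22 keywords (each lowered and substring-tested per field) by one precompiled re.IGNORECASE alternation of the escaped keywords, searched once per title and once per description, with a list-comprehension filter instead of the accumulator loop.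
import Mathlib
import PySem

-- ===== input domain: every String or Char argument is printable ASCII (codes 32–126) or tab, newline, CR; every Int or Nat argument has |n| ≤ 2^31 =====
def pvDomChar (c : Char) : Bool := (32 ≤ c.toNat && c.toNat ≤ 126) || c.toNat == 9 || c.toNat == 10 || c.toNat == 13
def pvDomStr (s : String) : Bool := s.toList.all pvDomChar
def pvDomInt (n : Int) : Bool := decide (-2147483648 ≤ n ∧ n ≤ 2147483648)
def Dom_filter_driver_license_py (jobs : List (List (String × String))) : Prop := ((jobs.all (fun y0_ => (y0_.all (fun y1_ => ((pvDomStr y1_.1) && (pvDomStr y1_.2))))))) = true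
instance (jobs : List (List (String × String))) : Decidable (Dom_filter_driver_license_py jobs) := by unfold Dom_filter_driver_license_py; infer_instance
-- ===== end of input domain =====

-- B replaces A's per-job inner loop over keywords by one precompiled case-insensitive
-- alternation pattern searched once per field (idiomatic; same results, return value only).

-- the shared keyword list (module constant in both Pythons)
def pvDriverKeywords : List String :=
  ["řidič", "ridic", "řidičský", "ridicsky", "řp", "ŘP",
   "vozidlo", "auto", "doprava", "řízení", "řidičák", "ridicak",
   "kategorie", "c+e", "c e", "b+e", "driving", "driver", "license",
   "vzv", "vysokozdvižný", "vysokozdvizny"]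

-- ===== PORT A =====
def filter_driver_license_py (jobs : List (List (String × String))) : List (List (String × String)) :=
  jobs.foldl
    (fun filtered job =>
      let titleLower := PySem.Str.lower (PySem.Dict.getD (PySem.Dict.ofList job) "title" "")
      let descriptionLower := PySem.Str.lower (PySem.Dict.getD (PySem.Dict.ofList job) "description" "")
      let hasDriver := pvDriverKeywords.any (fun keyword =>
        PySem.Str.isIn (PySem.Str.lower keyword) titleLower ||
        PySem.Str.isIn (PySem.Str.lower keyword) descriptionLower)
      if !hasDriver then filtered ++ [job] else filtered)
    []

-- ===== PORT B =====
-- the compiled pattern: the escaped-literal alternation with re.IGNORECASE, modelled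
-- (exact on ASCII text) as the case-folded keyword literals
def pvDriverPattern : List (List Char) :=
  pvDriverKeywords.map (fun k => PySem.Chars.lower k.toList)

-- pattern.search: scan the (case-folded) text left to right; at each position try every
-- alternative of the pattern as a literal prefix
def pvSearch (pats : List (List Char)) : List Char → Bool
  | [] => pats.any (fun p => p.isPrefixOf ([] : List Char))
  | c :: rest => pats.any (fun p => p.isPrefixOf (c :: rest)) || pvSearch pats rest

def filter_driver_license_py_alt (jobs : List (List (String × String))) : List (List (String × String)) :=
  jobs.filter (fun job =>
    !(pvSearch pvDriverPattern (PySem.Chars.lower (PySem.Dict.getD (PySem.Dict.ofList job) "title" "").toList) ||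
      pvSearch pvDriverPattern (PySem.Chars.lower (PySem.Dict.getD (PySem.Dict.ofList job) "description" "").toList)))

-- ===== PRECONDITION & SPEC =====
def Spec_filter_driver_license_py (jobs : List (List (String × String))) (out : List (List (String × String))) : Prop := out = filter_driver_license_py_alt jobs
instance (jobs : List (List (String × String))) (out : List (List (String × String))) : Decidable (Spec_filter_driver_license_py jobs out) := by unfold Spec_filter_driver_license_py; infer_instance

-- ===== CLAIM (what is proved, stated in full; the proofs are below) =====
def Claim_equal_filter_driver_license_py : Prop := ∀ (jobs : List (List (String × String))), Dom_filter_driver_license_py jobs → Spec_filter_driver_license_py jobs (filter_driver_license_py jobs)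

-- ===== LEMMAS AND PROOFS =====

theorem pv_any_or {α : Type} (l : List α) (f g : α → Bool) :
    l.any (fun x => f x || g x) = (l.any f || l.any g) := by
  induction l with
  | nil => rfl
  | cons a l ih =>
    rw [List.any_cons, List.any_cons, List.any_cons, ih]
    cases f a <;> cases g a <;> simp

theorem pv_any_congr {α : Type} (l : List α) (f g : α → Bool) (h : ∀ x ∈ l, f x = g x) :
    l.any f = l.any g := by
  induction l with
  | nil => rfl
  | cons a l ih =>
    rw [List.any_cons, List.any_cons, h a (by simp), ih (fun x hx => h x (by simp [hx]))]

-- the positional scan finds a pattern alternative iff some alternative is a substring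
theorem pvSearch_eq_any_isIn (pats : List (List Char)) (t : List Char) :
    pvSearch pats t = pats.any (fun p => PySem.Chars.isIn p t) := by
  induction t with
  | nil =>
    simp only [pvSearch]
    refine pv_any_congr _ _ _ (fun p _ => ?_)
    apply Bool.eq_iff_iff.mpr
    simp [List.isPrefixOf_iff_prefix, PySem.Chars.isIn_iff_infix, List.infix_nil]
  | cons c rest ih =>
    simp only [pvSearch, ih, ← pv_any_or]
    refine pv_any_congr _ _ _ (fun p _ => ?_)
    apply Bool.eq_iff_iff.mpr
    simp [List.isPrefixOf_iff_prefix, PySem.Chars.isIn_iff_infix, List.infix_cons_iff]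

-- A's keyword-major test equals B's pattern search, per field pair
theorem pv_job_cond (job : List (String × String)) :
    (pvDriverKeywords.any (fun keyword =>
        PySem.Str.isIn (PySem.Str.lower keyword) (PySem.Str.lower (PySem.Dict.getD (PySem.Dict.ofList job) "title" "")) ||
        PySem.Str.isIn (PySem.Str.lower keyword) (PySem.Str.lower (PySem.Dict.getD (PySem.Dict.ofList job) "description" ""))))
    = (pvSearch pvDriverPattern (PySem.Chars.lower (PySem.Dict.getD (PySem.Dict.ofList job) "title" "").toList) ||
       pvSearch pvDriverPattern (PySem.Chars.lower (PySem.Dict.getD (PySem.Dict.ofList job) "description" "").toList)) := by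
  rw [pvSearch_eq_any_isIn, pvSearch_eq_any_isIn]
  unfold pvDriverPattern
  rw [List.any_map, List.any_map, ← pv_any_or]
  refine pv_any_congr _ _ _ (fun kw _ => ?_)
  simp [PySem.Str.isIn]

theorem filter_driver_license_py_eq (jobs : List (List (String × String))) :
    filter_driver_license_py jobs = filter_driver_license_py_alt jobs := by
  unfold filter_driver_license_py filter_driver_license_py_alt
  rw [PySem.List.foldl_append_if]
  simp only [List.nil_append, List.map_id_fun', id]
  refine List.filter_congr (fun job _ => ?_)
  simp only [pv_job_cond]

-- ===== VERDICT (by name: the statement is the Claim_ definition above) =====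
theorem filter_driver_license_py_spec : Claim_equal_filter_driver_license_py := by
  intro jobs _
  unfold Spec_filter_driver_license_py
  exact filter_driver_license_py_eq jobs
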